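-- pv_equiv track=rewrite | github.com/jk-jung/problem-solving | codewars/6kyu/6_Length of missing array.py | get_length_of_missing_array
-- ===== SOURCE A (Python) =====
-- def get_length_of_missing_array(a):
--     try:
--         s = min(len(x) for x in a)
--         if s == 0:
--             return 0
--         for i in range(s, s + len(a) + 10):
--             if all(len(x) != i for x in a):
--                 return i
--     except:
--         pass
--     return 0
-- ===== SOURCE B (Python) =====
-- def get_length_of_missing_array(a):
--     lengths = sorted(len(x) for x in a)
--     if not lengths or lengths[0] == 0:
--         return 0
--     expected = lengths[0]
--     for l in lengths:
--         if l == expected: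
--             expected += 1
--         elif l > expected:
--             break
--         # l < expected: duplicate of an already-consumed value, skip
--     return expected
-- ===== Notes on version B (the rewrite author's own statement) =====
-- stated objective: alternative
-- what changed: Replaces A's repeated all(len(x)!=i) full scans over the list for each candidate i by a single sort of the lengths followed by one linear gap-finding pass.
import Mathlib
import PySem

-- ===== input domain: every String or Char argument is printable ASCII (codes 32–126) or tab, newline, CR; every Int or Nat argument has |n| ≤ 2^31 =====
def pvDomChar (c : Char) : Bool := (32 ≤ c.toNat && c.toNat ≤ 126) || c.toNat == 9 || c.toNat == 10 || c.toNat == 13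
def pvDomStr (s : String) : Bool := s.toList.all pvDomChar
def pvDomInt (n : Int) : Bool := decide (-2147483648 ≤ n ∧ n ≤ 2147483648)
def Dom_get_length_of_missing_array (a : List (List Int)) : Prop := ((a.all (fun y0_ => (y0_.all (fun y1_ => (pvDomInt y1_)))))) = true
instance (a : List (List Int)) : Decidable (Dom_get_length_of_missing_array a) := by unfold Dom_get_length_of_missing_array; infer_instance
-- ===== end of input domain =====

-- B replaces A's per-candidate full scans by one sort of the lengths plus a single gap-finding pass (objective: alternative).

-- ===== PORT A =====
-- the 'for i in range(s, s+len(a)+10)' loop: first i with all(len(x) != i); falls through to 'return 0'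
def pvALoop (a : List (List Int)) : List Int → Int
  | [] => 0
  | i :: rest => if a.all (fun x => (x.length : Int) != i) then i else pvALoop a rest

def get_length_of_missing_array (a : List (List Int)) : Int :=
  match PySem.List.min? (a.map fun x => (x.length : Int)) (fun v => v) with
  | none => 0  -- min() over the empty generator raises ValueError, caught by the bare except
  | some s => if s = 0 then 0 else pvALoop a (PySem.List.pyRange s (s + a.length + 10) 1)

-- ===== PORT B =====
-- the 'for l in lengths' pass of Source B
def pvBLoop (expected : Int) : List Int → Int
  | [] => expected
  | l :: rest =>
    if l = expected then pvBLoop (expected + 1) rest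
    else if l > expected then expected
    else pvBLoop expected rest

def get_length_of_missing_array_alt (a : List (List Int)) : Int :=
  match PySem.List.sorted (a.map fun x => (x.length : Int)) (fun v => v) false with
  | [] => 0
  | l0 :: rest => if l0 = 0 then 0 else pvBLoop l0 (l0 :: rest)

-- ===== PRECONDITION & SPEC =====
def Spec_get_length_of_missing_array (a : List (List Int)) (out : Int) : Prop := out = get_length_of_missing_array_alt a
instance (a : List (List Int)) (out : Int) : Decidable (Spec_get_length_of_missing_array a out) := by unfold Spec_get_length_of_missing_array; infer_instance

-- ===== CLAIM (what is proved, stated in full; the proofs are below) =====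
def Claim_equal_get_length_of_missing_array : Prop := ∀ (a : List (List Int)), Dom_get_length_of_missing_array a → Spec_get_length_of_missing_array a (get_length_of_missing_array a)

-- ===== LEMMAS AND PROOFS =====

-- B's pass advances `expected` at most once per consumed element
theorem pvBLoop_le (ls : List Int) : ∀ e : Int, pvBLoop e ls ≤ e + ls.length := by
  induction ls with
  | nil => intro e; simp [pvBLoop]
  | cons l rest ih =>
    intro e
    simp only [pvBLoop, List.length_cons]
    split_ifs with h1 h2
    · have := ih (e + 1); push_cast; omega
    · push_cast; omega
    · have := ih e; push_cast; omega

-- characterisation of B's pass on a sorted list: it returns the least value ≥ e absent from the list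
theorem pvBLoop_char (ls : List Int) (hs : ls.Pairwise (· ≤ ·)) : ∀ e : Int,
    e ≤ pvBLoop e ls ∧ pvBLoop e ls ∉ ls ∧ ∀ m : Int, e ≤ m → m < pvBLoop e ls → m ∈ ls := by
  induction ls with
  | nil => intro e; simp [pvBLoop]
  | cons l rest ih =>
    intro e
    have hrest : rest.Pairwise (· ≤ ·) := (List.pairwise_cons.mp hs).2
    have hhead : ∀ y ∈ rest, l ≤ y := (List.pairwise_cons.mp hs).1
    simp only [pvBLoop]
    split_ifs with h1 h2
    · -- l = e
      obtain ⟨ih1, ih2, ih3⟩ := ih hrest (e + 1)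
      subst h1
      refine ⟨by omega, ?_, ?_⟩
      · simp only [List.mem_cons]
        rintro (h | h)
        · omega
        · exact ih2 h
      · intro m hm1 hm2
        rcases eq_or_lt_of_le hm1 with h | h
        · simp [← h]
        · exact List.mem_cons_of_mem _ (ih3 m (by omega) hm2)
    · -- l > e: return e
      refine ⟨le_refl e, ?_, by omega⟩
      simp only [List.mem_cons]
      rintro (h | h)
      · omega
      · have := hhead e h; omega
    · -- l < e: skip
      obtain ⟨ih1, ih2, ih3⟩ := ih hrest e
      refine ⟨ih1, ?_, ?_⟩
      · simp only [List.mem_cons]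
        rintro (h | h)
        · omega
        · exact ih2 h
      · intro m hm1 hm2
        exact List.mem_cons_of_mem _ (ih3 m hm1 hm2)

-- A's loop over range(e, t) returns r when r is the first value ≥ e absent from the lengths
theorem pvALoop_range (a : List (List Int)) (r : Int)
    (hr : ∀ x ∈ a, (x.length : Int) ≠ r) :
    ∀ n : Nat, ∀ e t : Int, (t - e).toNat = n → e ≤ r → r < t →
    (∀ m : Int, e ≤ m → m < r → ∃ x ∈ a, (x.length : Int) = m) →
    pvALoop a (PySem.List.pyRange e t 1) = r := by
  intro n
  induction n with
  | zero => intro e t hn h1 h2 _; omega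
  | succ k ih =>
    intro e t hn h1 h2 hfill
    rw [PySem.List.pyRange_one_cons (by omega)]
    simp only [pvALoop]
    rcases eq_or_lt_of_le h1 with he | he
    · subst he
      have : a.all (fun x => (x.length : Int) != e) = true := by
        simp only [List.all_eq_true, bne_iff_ne, ne_eq]
        exact fun x hx => hr x hx
      simp [this]
    · have hmem := hfill e (le_refl e) he
      have : ¬ (a.all (fun x => (x.length : Int) != e) = true) := by
        simp only [List.all_eq_true, bne_iff_ne, ne_eq, not_forall]
        obtain ⟨x, hx, hxe⟩ := hmem
        exact ⟨x, hx, by omega⟩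
      simp only [this]
      exact ih (e + 1) t (by omega) (by omega) h2
        (fun m hm1 hm2 => hfill m (by omega) hm2)

-- ===== VERDICT (by name: the statement is the Claim_ definition above) =====
theorem get_length_of_missing_array_spec : Claim_equal_get_length_of_missing_array := by
  intro a _
  unfold Spec_get_length_of_missing_array get_length_of_missing_array get_length_of_missing_array_alt
  set lens := a.map (fun x => (x.length : Int)) with hlens
  rcases ha : PySem.List.sorted lens (fun v => v) false with _ | ⟨l0, rest⟩
  · -- lens sorted empty → lens = [] → a = [] → min? = none
    have : lens = [] := (PySem.List.sorted_eq_nil_iff lens _ false).mp ha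
    have ha0 : a = [] := by
      cases a with
      | nil => rfl
      | cons x xs => simp [hlens] at this
    subst ha0
    simp only [hlens]
    simp [PySem.List.min?]
  · -- nonempty case
    have hperm : (PySem.List.sorted lens (fun v => v) false).Perm lens :=
      PySem.List.sorted_perm lens _ false
    have hmemiff : ∀ y : Int, y ∈ l0 :: rest ↔ y ∈ lens := by
      intro y; rw [← ha]; exact hperm.mem_iff
    have hl0min : ∀ y ∈ lens, l0 ≤ y := PySem.List.key_head_sorted_le lens (fun v => v) ha
    have hl0mem : l0 ∈ lens := (hmemiff l0).mp (List.mem_cons_self)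
    -- A's min is l0
    have hlne : lens ≠ [] := fun h => by simp [h] at hl0mem
    obtain ⟨s, hs⟩ : ∃ s, PySem.List.min? lens (fun v => v) = some s := by
      cases hmin : PySem.List.min? lens (fun v => v) with
      | none => exact absurd ((PySem.List.min?_eq_none_iff lens _).mp hmin) hlne
      | some s => exact ⟨s, rfl⟩
    have hsmem : s ∈ lens := PySem.List.min?_mem hs
    have hsmin : ∀ y ∈ lens, s ≤ y := PySem.List.min?_isMin hs
    have hsl0 : s = l0 := le_antisymm (hsmin l0 hl0mem) (hl0min s hsmem)
    rw [hs, hsl0]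
    by_cases h0 : l0 = 0
    · simp [h0]
    · simp only [h0, if_false]
      -- both sides: the loops
      have hsorted : (l0 :: rest).Pairwise (· ≤ ·) := by
        have := PySem.List.sorted_pairwise lens (fun v => v)
        rw [ha] at this; exact this
      obtain ⟨hc1, hc2, hc3⟩ := pvBLoop_char (l0 :: rest) hsorted l0
      set r := pvBLoop l0 (l0 :: rest) with hrdef
      have hrle : r ≤ l0 + (l0 :: rest).length := pvBLoop_le (l0 :: rest) l0
      have hlen_eq : (l0 :: rest).length = a.length := by
        have := hperm.length_eq
        rw [ha] at this
        simpa [hlens] using this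
      apply pvALoop_range a r
      · intro x hx hxr
        apply hc2
        rw [hmemiff, hlens]
        exact hxr ▸ List.mem_map_of_mem hx
      · exact rfl
      · exact hc1
      · omega
      · intro m hm1 hm2
        have hm : m ∈ lens := (hmemiff m).mp (hc3 m hm1 hm2)
        rw [hlens] at hm
        obtain ⟨x, hx, hxm⟩ := List.mem_map.mp hm
        exact ⟨x, hx, hxm⟩
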